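-- pv_equiv track=rewrite | github.com/karel-brinda/masked-superstrings-supplement | experiments/08_optimize_masks/maskMinNumRuns.py | countNumRuns
-- ===== SOURCE A (Python) =====
-- def countNumRuns(maskedSuperstring):
--     runs = 0
--     lastOne = False
--     for a in maskedSuperstring:
--         if a.isupper():
--             lastOne = True
--         else:
--             if lastOne:
--                 runs = runs + 1
--             lastOne = False
--     if lastOne:
--         runs = runs + 1
--     return runs
-- ===== SOURCE B (Python) =====
-- def countNumRuns(maskedSuperstring):
--     spaced = ''.join(c if c.isupper() else ' ' for c in maskedSuperstring)
--     return len(spaced.split())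
-- ===== Notes on version B (the rewrite author's own statement) =====
-- stated objective: simpler
-- what changed: Replaced the lastOne state machine with trailing fixup by a staged pipeline: blank out every non-uppercase character and count the words of str.split(), so the run detection is delegated to the library's whitespace splitter.
import Mathlib
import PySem

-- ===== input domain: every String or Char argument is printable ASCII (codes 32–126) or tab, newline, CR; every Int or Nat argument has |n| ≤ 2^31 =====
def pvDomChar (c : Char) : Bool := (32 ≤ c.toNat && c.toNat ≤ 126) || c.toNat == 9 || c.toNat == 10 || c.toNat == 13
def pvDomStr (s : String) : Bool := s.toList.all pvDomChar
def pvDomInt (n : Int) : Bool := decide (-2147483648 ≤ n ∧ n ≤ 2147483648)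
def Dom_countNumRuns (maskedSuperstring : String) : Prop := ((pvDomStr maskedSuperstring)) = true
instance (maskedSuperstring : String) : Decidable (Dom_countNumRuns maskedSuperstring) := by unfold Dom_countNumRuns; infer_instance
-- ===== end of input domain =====

-- B replaces A's lastOne state machine (with trailing fixup) by a staged pipeline: blank out
-- non-uppercase characters, then count the words of str.split(); same cost, simpler.

-- ===== PORT A =====
-- the for-loop over the string's characters, carrying (runs, lastOne)
def countNumRunsLoop (cs : List Char) (runs : Int) (lastOne : Bool) : Int :=
  match cs with
  | [] => if lastOne then runs + 1 else runs
  | a :: rest =>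
      if PySem.Chars.isupper a then countNumRunsLoop rest runs true
      else countNumRunsLoop rest (if lastOne then runs + 1 else runs) false

def countNumRuns (maskedSuperstring : String) : Int :=
  countNumRunsLoop maskedSuperstring.toList 0 false

-- ===== PORT B =====
-- spaced = ''.join(c if c.isupper() else ' ' for c in maskedSuperstring); len(spaced.split())
def countNumRuns_alt (maskedSuperstring : String) : Int :=
  ((PySem.Str.split₀ (String.ofList
      (maskedSuperstring.toList.map (fun c => if PySem.Chars.isupper c then c else ' ')))).length : Int)

-- ===== PRECONDITION & SPEC =====
def Spec_countNumRuns (maskedSuperstring : String) (out : Int) : Prop := out = countNumRuns_alt maskedSuperstring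
instance (maskedSuperstring : String) (out : Int) : Decidable (Spec_countNumRuns maskedSuperstring out) := by unfold Spec_countNumRuns; infer_instance

-- ===== CLAIM (what is proved, stated in full; the proofs are below) =====
def Claim_equal_countNumRuns : Prop := ∀ (maskedSuperstring : String), Dom_countNumRuns maskedSuperstring → Spec_countNumRuns maskedSuperstring (countNumRuns maskedSuperstring)

-- ===== LEMMAS AND PROOFS =====

-- blanking map used by B
def blank (c : Char) : Char := if PySem.Chars.isupper c then c else ' '

theorem isspace_blank (c : Char) :
    PySem.Chars.isspace (blank c) = !PySem.Chars.isupper c := by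
  by_cases h : PySem.Chars.isupper c = true
  · simp only [blank, h, if_pos, Bool.not_true]
    simp only [PySem.Chars.isupper, Bool.and_eq_true, decide_eq_true_eq, Char.le_def,
      UInt32.le_iff_toNat_le] at h
    simp only [PySem.Chars.isspace, Char.toNat, Bool.or_eq_false_iff, Bool.and_eq_false_iff,
      decide_eq_false_iff_not]
    have hA : ('A' : Char).val.toNat = 65 := rfl
    have hZ : ('Z' : Char).val.toNat = 90 := rfl
    omega
  · simp only [blank, h, if_neg, Bool.not_eq_true] at *
    simp [h]
    decide

-- the loop of A computes the word-count delta of split₀.go on the blanked string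
theorem loop_eq_go (cs : List Char) (runs : Int) (lastOne : Bool)
    (cur : List Char) (acc : List (List Char)) (h : lastOne = !cur.isEmpty) :
    countNumRunsLoop cs runs lastOne
      = runs + ((PySem.Chars.split₀.go (cs.map blank) cur acc).length : Int) - acc.length := by
  induction cs generalizing runs lastOne cur acc with
  | nil =>
      unfold countNumRunsLoop PySem.Chars.split₀.go
      cases hc : cur.isEmpty <;> simp [hc] at h <;> simp [h, hc] <;> push_cast <;> ring
  | cons c rest ih =>
      unfold countNumRunsLoop
      simp only [List.map_cons]
      by_cases hc : PySem.Chars.isupper c = true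
      · have hs : PySem.Chars.isspace (blank c) = false := by rw [isspace_blank, hc]; rfl
        rw [if_pos hc]
        conv_rhs => rw [PySem.Chars.split₀.go]
        rw [hs]
        simp only [Bool.false_eq_true, if_false]
        have hb : blank c = c := by simp [blank, hc]
        rw [hb]
        exact ih runs true (c :: cur) acc (by simp)
      · have hs : PySem.Chars.isspace (blank c) = true := by
          rw [isspace_blank]; simp [hc]
        rw [if_neg hc]
        conv_rhs => rw [PySem.Chars.split₀.go]
        rw [hs]
        simp only [if_true]
        cases hcur : cur.isEmpty
        · simp only [Bool.false_eq_true, if_false]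
          simp [hcur] at h
          rw [if_pos h, ih (runs + 1) false [] (cur.reverse :: acc) (by simp)]
          simp only [List.length_cons]
          push_cast; ring
        · simp only [if_true]
          simp [hcur] at h
          rw [if_neg (by simp [h]), ih runs false [] acc (by simp)]

-- ===== VERDICT (by name: the statement is the Claim_ definition above) =====
theorem countNumRuns_spec : Claim_equal_countNumRuns := by
  intro s _
  unfold Spec_countNumRuns countNumRuns countNumRuns_alt
  rw [show (fun c => if PySem.Chars.isupper c then c else ' ') = blank from rfl]
  rw [loop_eq_go s.toList 0 false [] [] (by simp)]
  have h1 : (String.ofList (s.toList.map blank)).toList = s.toList.map blank := by simp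
  simp [PySem.Str.split₀, PySem.Chars.split₀, h1]
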